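-- pv_equiv track=rewrite | github.com/Demono5060/Metadata_parser | main.py | readable_rule
-- ===== SOURCE A (Python) =====
-- def readable_rule(rule: str) -> str:
--     """
--     Заменяет текст во входящих правилах
--     :param rule: Правило
--     :return: Измененное правило
--     """
--     readable = {'InRange': 'Диапазон числа',
--                 'Min': 'Минимальное значение',
--                 'Max': 'Максимальное значение',
--                 'Match': 'Регулярное выражение'}
--     for key, value in readable.items():
--         rule = rule.replace(key, value)
--     return rule
-- ===== SOURCE B (Python) =====
-- def readable_rule(rule: str) -> str:
--     """
--     Заменяет текст во входящих правилах одним проходом слева направо.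
--     :param rule: Правило
--     :return: Измененное правило
--     """
--     readable = {'InRange': 'Диапазон числа',
--                 'Min': 'Минимальное значение',
--                 'Max': 'Максимальное значение',
--                 'Match': 'Регулярное выражение'}
--     out = []
--     i = 0
--     n = len(rule)
--     while i < n:
--         for key, value in readable.items():
--             if rule.startswith(key, i):
--                 out.append(value)
--                 i += len(key)
--                 break
--         else:
--             out.append(rule[i])
--             i += 1
--     return ''.join(out)
-- ===== Notes on version B (the rewrite author's own statement) =====
-- stated objective: alternative
-- what changed: Four sequential full-string str.replace passes are replaced by a single left-to-right scan that tries the four keys at each position and emits the label (or the character) once, building the output in one pass.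
import Mathlib
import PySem

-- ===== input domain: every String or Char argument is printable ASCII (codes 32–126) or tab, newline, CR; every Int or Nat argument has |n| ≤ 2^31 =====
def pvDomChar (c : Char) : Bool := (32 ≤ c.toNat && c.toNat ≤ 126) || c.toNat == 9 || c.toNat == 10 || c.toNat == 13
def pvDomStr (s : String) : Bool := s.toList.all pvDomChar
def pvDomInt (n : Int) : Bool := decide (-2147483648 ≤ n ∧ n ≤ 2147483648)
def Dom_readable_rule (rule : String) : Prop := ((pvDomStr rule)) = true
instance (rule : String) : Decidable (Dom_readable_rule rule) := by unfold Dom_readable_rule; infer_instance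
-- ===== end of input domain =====

-- B replaces A's four sequential str.replace passes by a single left-to-right scan
-- that tries the four keys at each position (alternative one-pass algorithm, same result).


-- ===== PORT A =====
-- the dict literal, in insertion order
def pvReadableDict : PySem.Dict String String :=
  PySem.Dict.ofList
  [("InRange", "Диапазон числа"),
   ("Min", "Минимальное значение"),
   ("Max", "Максимальное значение"),
   ("Match", "Регулярное выражение")]

-- for key, value in readable.items(): rule = rule.replace(key, value)
def readable_rule (rule : String) : String :=
  (PySem.Dict.items pvReadableDict).foldl
    (fun r kv => PySem.Str.replace r kv.1 kv.2) rule

-- ===== PORT B =====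
-- one left-to-right pass: at each position try the keys in dict order, else copy the char
def pvScan : List Char → List Char
  | [] => []
  | c :: t =>
    if ['I','n','R','a','n','g','e'].isPrefixOf (c :: t) then
      "Диапазон числа".toList ++ pvScan (t.drop 6)
    else if ['M','i','n'].isPrefixOf (c :: t) then
      "Минимальное значение".toList ++ pvScan (t.drop 2)
    else if ['M','a','x'].isPrefixOf (c :: t) then
      "Максимальное значение".toList ++ pvScan (t.drop 2)
    else if ['M','a','t','c','h'].isPrefixOf (c :: t) then
      "Регулярное выражение".toList ++ pvScan (t.drop 4)
    else
      c :: pvScan t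
  termination_by l => l.length
  decreasing_by
    all_goals (simp [List.length_drop]; try omega)

def readable_rule_alt (rule : String) : String :=
  String.ofList (pvScan rule.toList)

-- ===== PRECONDITION & SPEC =====
def Spec_readable_rule (rule : String) (out : String) : Prop := out = readable_rule_alt rule
instance (rule : String) (out : String) : Decidable (Spec_readable_rule rule out) := by unfold Spec_readable_rule; infer_instance

-- ===== CLAIM (what is proved, stated in full; the proofs are below) =====
def Claim_equal_readable_rule : Prop := ∀ (rule : String), Dom_readable_rule rule → Spec_readable_rule rule (readable_rule rule)

-- ===== LEMMAS AND PROOFS =====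

-- single-key leftmost replace, structural form (= Chars.replace for a nonempty key)
def rep1 (old new : List Char) : List Char → List Char
  | [] => []
  | c :: t =>
    if old.isPrefixOf (c :: t) then new ++ rep1 old new (t.drop (old.length - 1))
    else c :: rep1 old new t
  termination_by l => l.length
  decreasing_by
    all_goals (simp [List.length_drop]; try omega)

theorem replace_go_eq_rep1 (o : Char) (old' new : List Char) :
    ∀ fuel l acc, l.length ≤ fuel →
      PySem.Chars.replace.go (o :: old') new fuel l acc
        = acc.reverse ++ rep1 (o :: old') new l := by
  intro fuel
  induction fuel with
  | zero =>
      intro l acc h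
      have : l = [] := List.eq_nil_of_length_eq_zero (Nat.le_zero.mp h)
      subst this
      simp [PySem.Chars.replace.go, rep1]
  | succ n ih =>
      intro l acc h
      cases l with
      | nil => simp [PySem.Chars.replace.go, rep1]
      | cons c t =>
          by_cases hp : (o :: old').isPrefixOf (c :: t)
          · have hlen : (List.drop (o :: old').length (c :: t)).length ≤ n := by
              simp [List.length_drop] at *
              omega
            rw [show PySem.Chars.replace.go (o :: old') new (n+1) (c :: t) acc
                  = PySem.Chars.replace.go (o :: old') new n
                      (List.drop (o :: old').length (c :: t)) (new.reverse ++ acc) by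
                  simp [PySem.Chars.replace.go, hp]]
            rw [ih _ _ hlen]
            rw [rep1]
            simp [hp, List.append_assoc]
          · have hlen : t.length ≤ n := by simp at h; omega
            rw [show PySem.Chars.replace.go (o :: old') new (n+1) (c :: t) acc
                  = PySem.Chars.replace.go (o :: old') new n t (c :: acc) by
                  simp [PySem.Chars.replace.go, hp]]
            rw [ih _ _ hlen]
            rw [rep1]
            simp [hp]

theorem replace_eq_rep1 (o : Char) (old' new s : List Char) :
    PySem.Chars.replace s (o :: old') new = rep1 (o :: old') new s := by
  rw [PySem.Chars.replace]
  simp [replace_go_eq_rep1 o old' new s.length s [] (le_refl _)]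

-- a block V none of whose characters equals the key's first character passes through rep1
theorem rep1_append_pass (o : Char) (old' new V y : List Char)
    (hV : ∀ c ∈ V, c ≠ o) :
    rep1 (o :: old') new (V ++ y) = V ++ rep1 (o :: old') new y := by
  induction V with
  | nil => simp
  | cons c V ihV =>
      have hc : c ≠ o := hV c (by simp)
      have hpre : (o :: old').isPrefixOf (c :: (V ++ y)) = false := by
        simp [List.isPrefixOf]
        intro h; exact absurd h.symm hc
      rw [List.cons_append, rep1, hpre]
      simp [ihV (fun d hd => hV d (by simp [hd]))]

-- a prefix made of characters different from the replacement's first character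
-- is reflected back through rep1
theorem rep1_prefix_reflect (o nh : Char) (old' nt : List Char) :
    ∀ t p, (∀ ch ∈ p, ch ≠ nh) →
      List.isPrefixOf p (rep1 (o :: old') (nh :: nt) t) → List.isPrefixOf p t := by
  suffices H : ∀ n t p, t.length ≤ n → (∀ ch ∈ p, ch ≠ nh) →
      List.isPrefixOf p (rep1 (o :: old') (nh :: nt) t) → List.isPrefixOf p t by
    intro t p hp h; exact H t.length t p le_rfl hp h
  intro n
  induction n with
  | zero =>
      intro t p hlen hp h
      have : t = [] := List.eq_nil_of_length_eq_zero (Nat.le_zero.mp hlen)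
      subst this
      rw [rep1] at h
      exact h
  | succ n ih =>
      intro t p hlen hp h
      cases t with
      | nil => rw [rep1] at h; exact h
      | cons c t =>
          rw [rep1] at h
          by_cases hpre : List.isPrefixOf (o :: old') (c :: t)
          · rw [if_pos hpre] at h
            cases p with
            | nil => simp [List.isPrefixOf]
            | cons q p' =>
                exfalso
                rw [List.cons_append] at h
                simp [List.isPrefixOf] at h
                exact hp q (by simp) h.1
          · rw [if_neg hpre] at h
            cases p with
            | nil => simp [List.isPrefixOf]
            | cons q p' =>
                simp [List.isPrefixOf] at h ⊢
                refine ⟨h.1, ?_⟩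
                have hlen' : t.length ≤ n := by simp at hlen; omega
                exact List.isPrefixOf_iff_prefix.mp (ih t p' hlen' (fun d hd => hp d (by simp [hd])) (List.isPrefixOf_iff_prefix.mpr h.2))


theorem pass_min_vIn (y : List Char) :
    rep1 ['M','i','n'] "Минимальное значение".toList ("Диапазон числа".toList ++ y) = "Диапазон числа".toList ++ rep1 ['M','i','n'] "Минимальное значение".toList y :=
  rep1_append_pass 'M' _ _ _ y (by simp)

theorem pass_max_vIn (y : List Char) :
    rep1 ['M','a','x'] "Максимальное значение".toList ("Диапазон числа".toList ++ y) = "Диапазон числа".toList ++ rep1 ['M','a','x'] "Максимальное значение".toList y :=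
  rep1_append_pass 'M' _ _ _ y (by simp)

theorem pass_match_vIn (y : List Char) :
    rep1 ['M','a','t','c','h'] "Регулярное выражение".toList ("Диапазон числа".toList ++ y) = "Диапазон числа".toList ++ rep1 ['M','a','t','c','h'] "Регулярное выражение".toList y :=
  rep1_append_pass 'M' _ _ _ y (by simp)

theorem pass_max_vMin (y : List Char) :
    rep1 ['M','a','x'] "Максимальное значение".toList ("Минимальное значение".toList ++ y) = "Минимальное значение".toList ++ rep1 ['M','a','x'] "Максимальное значение".toList y :=
  rep1_append_pass 'M' _ _ _ y (by simp)

theorem pass_match_vMin (y : List Char) :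
    rep1 ['M','a','t','c','h'] "Регулярное выражение".toList ("Минимальное значение".toList ++ y) = "Минимальное значение".toList ++ rep1 ['M','a','t','c','h'] "Регулярное выражение".toList y :=
  rep1_append_pass 'M' _ _ _ y (by simp)

theorem pass_match_vMax (y : List Char) :
    rep1 ['M','a','t','c','h'] "Регулярное выражение".toList ("Максимальное значение".toList ++ y) = "Максимальное значение".toList ++ rep1 ['M','a','t','c','h'] "Регулярное выражение".toList y :=
  rep1_append_pass 'M' _ _ _ y (by simp)

theorem neg_in_min (u : List Char) :
    rep1 ['I','n','R','a','n','g','e'] "Диапазон числа".toList ('M'::'i'::'n'::u) = 'M'::'i'::'n'::rep1 ['I','n','R','a','n','g','e'] "Диапазон числа".toList u := by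
  rw [rep1, rep1, rep1]; simp [List.isPrefixOf]

theorem neg_in_max (u : List Char) :
    rep1 ['I','n','R','a','n','g','e'] "Диапазон числа".toList ('M'::'a'::'x'::u) = 'M'::'a'::'x'::rep1 ['I','n','R','a','n','g','e'] "Диапазон числа".toList u := by
  rw [rep1, rep1, rep1]; simp [List.isPrefixOf]

theorem neg_in_match (u : List Char) :
    rep1 ['I','n','R','a','n','g','e'] "Диапазон числа".toList ('M'::'a'::'t'::'c'::'h'::u) = 'M'::'a'::'t'::'c'::'h'::rep1 ['I','n','R','a','n','g','e'] "Диапазон числа".toList u := by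
  rw [rep1, rep1, rep1, rep1, rep1]; simp [List.isPrefixOf]

theorem neg_min_max (u : List Char) :
    rep1 ['M','i','n'] "Минимальное значение".toList ('M'::'a'::'x'::u) = 'M'::'a'::'x'::rep1 ['M','i','n'] "Минимальное значение".toList u := by
  rw [rep1, rep1, rep1]; simp [List.isPrefixOf]

theorem neg_min_match (u : List Char) :
    rep1 ['M','i','n'] "Минимальное значение".toList ('M'::'a'::'t'::'c'::'h'::u) = 'M'::'a'::'t'::'c'::'h'::rep1 ['M','i','n'] "Минимальное значение".toList u := by
  rw [rep1, rep1, rep1, rep1, rep1]; simp [List.isPrefixOf]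

theorem neg_max_match (u : List Char) :
    rep1 ['M','a','x'] "Максимальное значение".toList ('M'::'a'::'t'::'c'::'h'::u) = 'M'::'a'::'t'::'c'::'h'::rep1 ['M','a','x'] "Максимальное значение".toList u := by
  rw [rep1, rep1, rep1, rep1, rep1]; simp [List.isPrefixOf]

theorem pos_in (u : List Char) :
    rep1 ['I','n','R','a','n','g','e'] "Диапазон числа".toList ('I'::'n'::'R'::'a'::'n'::'g'::'e'::u) = "Диапазон числа".toList ++ rep1 ['I','n','R','a','n','g','e'] "Диапазон числа".toList u := by
  rw [rep1]; simp [List.isPrefixOf]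

theorem pos_min (u : List Char) :
    rep1 ['M','i','n'] "Минимальное значение".toList ('M'::'i'::'n'::u) = "Минимальное значение".toList ++ rep1 ['M','i','n'] "Минимальное значение".toList u := by
  rw [rep1]; simp [List.isPrefixOf]

theorem pos_max (u : List Char) :
    rep1 ['M','a','x'] "Максимальное значение".toList ('M'::'a'::'x'::u) = "Максимальное значение".toList ++ rep1 ['M','a','x'] "Максимальное значение".toList u := by
  rw [rep1]; simp [List.isPrefixOf]

theorem pos_match (u : List Char) :
    rep1 ['M','a','t','c','h'] "Регулярное выражение".toList ('M'::'a'::'t'::'c'::'h'::u) = "Регулярное выражение".toList ++ rep1 ['M','a','t','c','h'] "Регулярное выражение".toList u := by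
  rw [rep1]; simp [List.isPrefixOf]

theorem vIn_cons : "Диапазон числа".toList = 'Д'::"иапазон числа".toList := by decide
theorem vMin_cons : "Минимальное значение".toList = 'М'::"инимальное значение".toList := by decide
theorem vMax_cons : "Максимальное значение".toList = 'М'::"аксимальное значение".toList := by decide

theorem chain_eq_scan2 : ∀ s : List Char,
    rep1 ['M','a','t','c','h'] "Регулярное выражение".toList
      (rep1 ['M','a','x'] "Максимальное значение".toList
        (rep1 ['M','i','n'] "Минимальное значение".toList
          (rep1 ['I','n','R','a','n','g','e'] "Диапазон числа".toList s))) = pvScan s := by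
  suffices H : ∀ n (s : List Char), s.length ≤ n →
      rep1 ['M','a','t','c','h'] "Регулярное выражение".toList
        (rep1 ['M','a','x'] "Максимальное значение".toList
          (rep1 ['M','i','n'] "Минимальное значение".toList
            (rep1 ['I','n','R','a','n','g','e'] "Диапазон числа".toList s))) = pvScan s by
    intro s; exact H s.length s le_rfl
  intro n
  induction n with
  | zero =>
      intro s h
      have : s = [] := List.eq_nil_of_length_eq_zero (Nat.le_zero.mp h)
      subst this
      rw [rep1, rep1, rep1, rep1, pvScan]
  | succ n ih =>
      intro s hlen
      cases s with
      | nil => rw [rep1, rep1, rep1, rep1, pvScan]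
      | cons c t =>
          by_cases h1 : List.isPrefixOf ['I','n','R','a','n','g','e'] (c :: t) = true
          · obtain ⟨u, hu⟩ := List.isPrefixOf_iff_prefix.mp h1
            obtain ⟨rfl, rfl⟩ : c = 'I' ∧ t = 'n'::'R'::'a'::'n'::'g'::'e'::u := by
              simpa using hu.symm
            rw [pos_in, pass_min_vIn, pass_max_vIn, pass_match_vIn]
            rw [show pvScan ('I'::'n'::'R'::'a'::'n'::'g'::'e'::u) = "Диапазон числа".toList ++ pvScan u by
              rw [pvScan]; simp [List.isPrefixOf]]
            rw [ih u (by simp at hlen; omega)]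
          · by_cases h2 : List.isPrefixOf ['M','i','n'] (c :: t) = true
            · obtain ⟨u, hu⟩ := List.isPrefixOf_iff_prefix.mp h2
              obtain ⟨rfl, rfl⟩ : c = 'M' ∧ t = 'i'::'n'::u := by simpa using hu.symm
              rw [neg_in_min, pos_min, pass_max_vMin, pass_match_vMin]
              rw [show pvScan ('M'::'i'::'n'::u) = "Минимальное значение".toList ++ pvScan u by
                rw [pvScan]; simp [List.isPrefixOf]]
              rw [ih u (by simp at hlen; omega)]
            · by_cases h3 : List.isPrefixOf ['M','a','x'] (c :: t) = true
              · obtain ⟨u, hu⟩ := List.isPrefixOf_iff_prefix.mp h3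
                obtain ⟨rfl, rfl⟩ : c = 'M' ∧ t = 'a'::'x'::u := by simpa using hu.symm
                rw [neg_in_max, neg_min_max, pos_max, pass_match_vMax]
                rw [show pvScan ('M'::'a'::'x'::u) = "Максимальное значение".toList ++ pvScan u by
                  rw [pvScan]; simp [List.isPrefixOf]]
                rw [ih u (by simp at hlen; omega)]
              · by_cases h4 : List.isPrefixOf ['M','a','t','c','h'] (c :: t) = true
                · obtain ⟨u, hu⟩ := List.isPrefixOf_iff_prefix.mp h4
                  obtain ⟨rfl, rfl⟩ : c = 'M' ∧ t = 'a'::'t'::'c'::'h'::u := by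
                    simpa using hu.symm
                  rw [neg_in_match, neg_min_match, neg_max_match, pos_match]
                  rw [show pvScan ('M'::'a'::'t'::'c'::'h'::u) = "Регулярное выражение".toList ++ pvScan u by
                    rw [pvScan]; simp [List.isPrefixOf]]
                  rw [ih u (by simp at hlen; omega)]
                · -- no key matches at this position
                  have e1 : rep1 ['I','n','R','a','n','g','e'] "Диапазон числа".toList (c :: t) = c :: rep1 ['I','n','R','a','n','g','e'] "Диапазон числа".toList t := by
                    rw [rep1, if_neg h1]
                  have hx2 : ¬ (List.isPrefixOf ['M','i','n'] (c :: rep1 ['I','n','R','a','n','g','e'] "Диапазон числа".toList t) = true) := by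
                    intro hcon
                    apply h2
                    simp only [List.isPrefixOf, Bool.and_eq_true, beq_iff_eq] at hcon ⊢
                    refine ⟨hcon.1, ?_⟩
                    have hr := hcon.2
                    rw [vIn_cons] at hr
                    exact rep1_prefix_reflect 'I' 'Д' _ _ t ['i','n'] (by simp) hr
                  have e2 : rep1 ['M','i','n'] "Минимальное значение".toList (c :: rep1 ['I','n','R','a','n','g','e'] "Диапазон числа".toList t)
                      = c :: rep1 ['M','i','n'] "Минимальное значение".toList (rep1 ['I','n','R','a','n','g','e'] "Диапазон числа".toList t) := by
                    rw [rep1, if_neg hx2]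
                  have hx3 : ¬ (List.isPrefixOf ['M','a','x']
                      (c :: rep1 ['M','i','n'] "Минимальное значение".toList (rep1 ['I','n','R','a','n','g','e'] "Диапазон числа".toList t)) = true) := by
                    intro hcon
                    apply h3
                    simp only [List.isPrefixOf, Bool.and_eq_true, beq_iff_eq] at hcon ⊢
                    refine ⟨hcon.1, ?_⟩
                    have hr := hcon.2
                    rw [vMin_cons] at hr
                    have hr2 := rep1_prefix_reflect 'M' 'М' _ _ _ ['a','x'] (by simp) hr
                    rw [vIn_cons] at hr2
                    exact rep1_prefix_reflect 'I' 'Д' _ _ t ['a','x'] (by simp) hr2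
                  have e3 : rep1 ['M','a','x'] "Максимальное значение".toList (c :: rep1 ['M','i','n'] "Минимальное значение".toList (rep1 ['I','n','R','a','n','g','e'] "Диапазон числа".toList t))
                      = c :: rep1 ['M','a','x'] "Максимальное значение".toList (rep1 ['M','i','n'] "Минимальное значение".toList (rep1 ['I','n','R','a','n','g','e'] "Диапазон числа".toList t)) := by
                    rw [rep1, if_neg hx3]
                  have hx4 : ¬ (List.isPrefixOf ['M','a','t','c','h']
                      (c :: rep1 ['M','a','x'] "Максимальное значение".toList (rep1 ['M','i','n'] "Минимальное значение".toList (rep1 ['I','n','R','a','n','g','e'] "Диапазон числа".toList t))) = true) := by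
                    intro hcon
                    apply h4
                    simp only [List.isPrefixOf, Bool.and_eq_true, beq_iff_eq] at hcon ⊢
                    refine ⟨hcon.1, ?_⟩
                    have hr := hcon.2
                    rw [vMax_cons] at hr
                    have hr2 := rep1_prefix_reflect 'M' 'М' _ _ _ ['a','t','c','h'] (by simp) hr
                    rw [vMin_cons] at hr2
                    have hr3 := rep1_prefix_reflect 'M' 'М' _ _ _ ['a','t','c','h'] (by simp) hr2
                    rw [vIn_cons] at hr3
                    exact rep1_prefix_reflect 'I' 'Д' _ _ t ['a','t','c','h'] (by simp) hr3
                  have e4 : rep1 ['M','a','t','c','h'] "Регулярное выражение".toList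
                        (c :: rep1 ['M','a','x'] "Максимальное значение".toList (rep1 ['M','i','n'] "Минимальное значение".toList (rep1 ['I','n','R','a','n','g','e'] "Диапазон числа".toList t)))
                      = c :: rep1 ['M','a','t','c','h'] "Регулярное выражение".toList
                          (rep1 ['M','a','x'] "Максимальное значение".toList (rep1 ['M','i','n'] "Минимальное значение".toList (rep1 ['I','n','R','a','n','g','e'] "Диапазон числа".toList t))) := by
                    rw [rep1, if_neg hx4]
                  rw [e1, e2, e3, e4]
                  rw [show pvScan (c :: t) = c :: pvScan t by
                    rw [pvScan, if_neg h1, if_neg h2, if_neg h3, if_neg h4]]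
                  rw [ih t (by simp at hlen; omega)]

-- ===== VERDICT (by name: the statement is the Claim_ definition above) =====
theorem readable_rule_spec : Claim_equal_readable_rule := by
  intro rule _
  unfold Spec_readable_rule readable_rule_alt
  have hA : readable_rule rule
      = PySem.Str.replace (PySem.Str.replace (PySem.Str.replace (PySem.Str.replace rule
          "InRange" "Диапазон числа") "Min" "Минимальное значение")
          "Max" "Максимальное значение") "Match" "Регулярное выражение" := rfl
  rw [hA]
  have kInEq : "InRange".toList = 'I'::['n','R','a','n','g','e'] := by decide
  have kMinEq : "Min".toList = 'M'::['i','n'] := by decide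
  have kMaxEq : "Max".toList = 'M'::['a','x'] := by decide
  have kMatchEq : "Match".toList = 'M'::['a','t','c','h'] := by decide
  simp only [PySem.Str.replace, String.toList_ofList]
  congr 1
  rw [kInEq, kMinEq, kMaxEq, kMatchEq,
      replace_eq_rep1, replace_eq_rep1, replace_eq_rep1, replace_eq_rep1]
  exact chain_eq_scan2 rule.toList
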